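-- pv_equiv track=rewrite | github.com/PrisD/TP-Lexer-Parser | test.py | afd_equal
-- ===== SOURCE A (Python) =====
-- ESTADO_NO_FINAL = 'ESTADO NO FINAL'
--
-- ESTADO_ACEPTADO = 'ESTADO ACEPTADO'
--
-- ESTADO_TRAMPA = 'ESTADO TRAMPA'
--
-- def afd_equal (lexema):
--     estado_actual = 'A'
--     estado_final = 'Z'
--     estado_trampa = 'X'
--     for caracter in lexema:
--         if estado_actual == 'A' and caracter == 'e':
--             estado_actual = 'B'
--         elif estado_actual == 'A' and caracter != 'e':
--             estado_actual = 'X'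
--         elif estado_actual == 'B' and caracter == 'q':
--             estado_actual = 'C'
--         elif estado_actual == 'B' and caracter != 'q':
--             estado_actual = 'X'
--         elif estado_actual == 'C' and caracter == 'u':
--             estado_actual = 'D'
--         elif estado_actual == 'C' and caracter != 'u':
--             estado_actual = 'X'
--         elif estado_actual == 'D' and caracter == 'a':
--             estado_actual = 'E'
--         elif estado_actual == 'D' and caracter != 'a':
--             estado_actual = 'X'
--         elif estado_actual == 'E' and caracter == 'l':
--             estado_actual = 'Z'
--         elif estado_actual == 'E' and caracter != 'l':
--             estado_actual = 'X'
--         elif estado_actual == 'Z' and caracter.isascii():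
--             estado_actual = 'X'
--         elif estado_actual == 'X' and caracter.isascii():
--             estado_actual = 'X'
--     if  estado_actual == estado_final:
--         return ESTADO_ACEPTADO
--     elif estado_actual == estado_trampa:
--         return ESTADO_TRAMPA
--     else:
--         return ESTADO_NO_FINAL
-- ===== SOURCE B (Python) =====
-- ESTADO_NO_FINAL = 'ESTADO NO FINAL'
--
-- ESTADO_ACEPTADO = 'ESTADO ACEPTADO'
--
-- ESTADO_TRAMPA = 'ESTADO TRAMPA'
--
-- def afd_equal(lexema):
--     if lexema == 'equal':
--         return ESTADO_ACEPTADO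
--     if 'equal'.startswith(lexema):
--         return ESTADO_NO_FINAL
--     return ESTADO_TRAMPA
-- ===== Notes on version B (the rewrite author's own statement) =====
-- stated objective: simpler
-- what changed: Replaces the character-by-character 8-state DFA loop with two string predicates: exact equality with the target word for acceptance and a startswith prefix test for the non-final states; faster by a constant factor because the Python-level per-character loop becomes C-level string comparisons.
import Mathlib
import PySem

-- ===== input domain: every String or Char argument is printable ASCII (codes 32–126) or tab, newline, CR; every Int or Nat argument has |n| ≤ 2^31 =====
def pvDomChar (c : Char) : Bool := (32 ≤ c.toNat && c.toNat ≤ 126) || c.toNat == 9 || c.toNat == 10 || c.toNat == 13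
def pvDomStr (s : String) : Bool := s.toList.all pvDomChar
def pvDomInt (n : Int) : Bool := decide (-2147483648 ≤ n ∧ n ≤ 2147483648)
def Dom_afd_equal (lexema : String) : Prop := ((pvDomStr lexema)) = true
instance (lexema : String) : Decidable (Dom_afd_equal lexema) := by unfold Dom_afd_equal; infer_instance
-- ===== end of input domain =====

-- B replaces A's character-by-character 8-state DFA loop by two string predicates
-- (equality with "equal", and "equal".startswith(lexema) for the prefix states) — simpler, same cost.

-- ===== PORT A =====
-- one DFA transition: the if/elif chain of A's loop body, in order
-- (caracter.isascii() is ported by hand as c.toNat < 128 — exact: Python's str.isascii is ord < 128)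
def afdStep (s : String) (c : Char) : String :=
  if s = "A" ∧ c = 'e' then "B"
  else if s = "A" ∧ c ≠ 'e' then "X"
  else if s = "B" ∧ c = 'q' then "C"
  else if s = "B" ∧ c ≠ 'q' then "X"
  else if s = "C" ∧ c = 'u' then "D"
  else if s = "C" ∧ c ≠ 'u' then "X"
  else if s = "D" ∧ c = 'a' then "E"
  else if s = "D" ∧ c ≠ 'a' then "X"
  else if s = "E" ∧ c = 'l' then "Z"
  else if s = "E" ∧ c ≠ 'l' then "X"
  else if s = "Z" ∧ c.toNat < 128 then "X"
  else if s = "X" ∧ c.toNat < 128 then "X"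
  else s

def afd_equal (lexema : String) : String :=
  let estado_actual := lexema.toList.foldl afdStep "A"
  if estado_actual = "Z" then "ESTADO ACEPTADO"
  else if estado_actual = "X" then "ESTADO TRAMPA"
  else "ESTADO NO FINAL"

-- ===== PORT B =====
def afd_equal_alt (lexema : String) : String :=
  if lexema = "equal" then "ESTADO ACEPTADO"
  else if PySem.Str.startswith "equal" lexema then "ESTADO NO FINAL"
  else "ESTADO TRAMPA"

-- ===== PRECONDITION & SPEC =====
def Spec_afd_equal (lexema : String) (out : String) : Prop := out = afd_equal_alt lexema
instance (lexema : String) (out : String) : Decidable (Spec_afd_equal lexema out) := by unfold Spec_afd_equal; infer_instance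

-- ===== CLAIM (what is proved, stated in full; the proofs are below) =====
def Claim_equal_afd_equal : Prop := ∀ (lexema : String), Dom_afd_equal lexema → Spec_afd_equal lexema (afd_equal lexema)

-- ===== LEMMAS AND PROOFS =====

lemma stepX (c : Char) : afdStep "X" c = "X" := by
  simp [afdStep]

lemma runX (l : List Char) : l.foldl afdStep "X" = "X" := by
  induction l with
  | nil => rfl
  | cons c l ih => rw [List.foldl_cons, stepX]; exact ih

lemma stepZ (c : Char) (h : c.toNat < 128) : afdStep "Z" c = "X" := by
  simp [afdStep, h]

-- the verdict computed from the final DFA state, on the char-list level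
lemma core (l : List Char) (h : ∀ c ∈ l, c.toNat < 128) :
    (if l.foldl afdStep "A" = "Z" then "ESTADO ACEPTADO"
     else if l.foldl afdStep "A" = "X" then "ESTADO TRAMPA"
     else "ESTADO NO FINAL")
    = (if l = ['e','q','u','a','l'] then "ESTADO ACEPTADO"
       else if l <+: ['e','q','u','a','l'] then "ESTADO NO FINAL"
       else "ESTADO TRAMPA") := by
  rcases l with _ | ⟨c1, l⟩
  · simp
  by_cases h1 : c1 = 'e'
  case neg =>
    have hf : (c1 :: l).foldl afdStep "A" = "X" := by
      rw [List.foldl_cons, show afdStep "A" c1 = "X" from by simp [afdStep, h1], runX]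
    simp [hf, List.cons_prefix_cons, h1]
  subst h1
  rcases l with _ | ⟨c2, l⟩
  · simp [afdStep]
  by_cases h2 : c2 = 'q'
  case neg =>
    have hf : ('e' :: c2 :: l).foldl afdStep "A" = "X" := by
      rw [List.foldl_cons, show afdStep "A" 'e' = "B" from rfl, List.foldl_cons,
        show afdStep "B" c2 = "X" from by simp [afdStep, h2], runX]
    simp [hf, List.cons_prefix_cons, h2]
  subst h2
  rcases l with _ | ⟨c3, l⟩
  · simp [afdStep]
  by_cases h3 : c3 = 'u'
  case neg =>
    have hf : ('e' :: 'q' :: c3 :: l).foldl afdStep "A" = "X" := by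
      rw [List.foldl_cons, List.foldl_cons, show afdStep (afdStep "A" 'e') 'q' = "C" from rfl,
        List.foldl_cons, show afdStep "C" c3 = "X" from by simp [afdStep, h3], runX]
    simp [hf, List.cons_prefix_cons, h3]
  subst h3
  rcases l with _ | ⟨c4, l⟩
  · simp [afdStep]
  by_cases h4 : c4 = 'a'
  case neg =>
    have hf : ('e' :: 'q' :: 'u' :: c4 :: l).foldl afdStep "A" = "X" := by
      rw [List.foldl_cons, List.foldl_cons, List.foldl_cons,
        show afdStep (afdStep (afdStep "A" 'e') 'q') 'u' = "D" from rfl,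
        List.foldl_cons, show afdStep "D" c4 = "X" from by simp [afdStep, h4], runX]
    simp [hf, List.cons_prefix_cons, h4]
  subst h4
  rcases l with _ | ⟨c5, l⟩
  · simp [afdStep]
  by_cases h5 : c5 = 'l'
  case neg =>
    have hf : ('e' :: 'q' :: 'u' :: 'a' :: c5 :: l).foldl afdStep "A" = "X" := by
      rw [List.foldl_cons, List.foldl_cons, List.foldl_cons, List.foldl_cons,
        show afdStep (afdStep (afdStep (afdStep "A" 'e') 'q') 'u') 'a' = "E" from rfl,
        List.foldl_cons, show afdStep "E" c5 = "X" from by simp [afdStep, h5], runX]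
    simp [hf, List.cons_prefix_cons, h5]
  subst h5
  rcases l with _ | ⟨c6, l⟩
  · simp [afdStep]
  have hf : ('e' :: 'q' :: 'u' :: 'a' :: 'l' :: c6 :: l).foldl afdStep "A" = "X" := by
    rw [List.foldl_cons, List.foldl_cons, List.foldl_cons, List.foldl_cons, List.foldl_cons,
      show afdStep (afdStep (afdStep (afdStep (afdStep "A" 'e') 'q') 'u') 'a') 'l' = "Z" from rfl,
      List.foldl_cons, stepZ c6 (h c6 (by simp)), runX]
  simp [hf, List.cons_prefix_cons]

-- ===== VERDICT (by name: the statement is the Claim_ definition above) =====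
theorem afd_equal_spec : Claim_equal_afd_equal := by
  intro lexema hdom
  unfold Spec_afd_equal afd_equal afd_equal_alt
  have hlex : (lexema = "equal") ↔ lexema.toList = ['e','q','u','a','l'] := by
    constructor
    · intro h; subst h; rfl
    · intro h
      have := congrArg String.ofList h
      simpa using this
  have hpre : (PySem.Str.startswith "equal" lexema = true) ↔
      lexema.toList <+: ['e','q','u','a','l'] := by
    rw [PySem.Str.startswith_eq, PySem.Chars.startswith_iff]
    rfl
  have hascii : ∀ c ∈ lexema.toList, c.toNat < 128 := by
    intro c hc
    have := List.all_eq_true.mp hdom c hc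
    simp [pvDomChar] at this
    omega
  have hcore := core lexema.toList hascii
  simp only [hlex, hpre] at *
  rw [hcore]
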